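-- pv_equiv track=rewrite | github.com/Jiho1996/baekjoon_Python | programmers/신규 아이디 추천.py | SecondStep
-- ===== SOURCE A (Python) =====
-- def SecondStep(new_id):
--     #알파벳 소문자, 숫자, 빼기(-), 밑줄(_), 마침표(.)
--     temp = []
--     for i in range(len(new_id)):
--         temp.append(ord(new_id[i]))
--         if not (97 <= temp[-1] <= 122 or 48 <= temp[-1] <= 57 or temp[-1] == 45 \
--                 or temp[-1] == 46 or temp[-1] == 95) :
--             del temp[-1]
--             continue
--         temp[-1] = chr(temp[-1])
--     return ''.join(temp)
-- ===== SOURCE B (Python) =====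
-- import re
--
-- # B: one regex substitution instead of A's per-character ord()-range loop; same O(n), measurably faster (C regex engine).
-- def SecondStep(new_id):
--     return re.sub(r'[^a-z0-9._-]', '', new_id)
-- ===== Notes on version B (the rewrite author's own statement) =====
-- stated objective: idiomatic
-- what changed: Replaces the explicit ord()-range loop with append/del bookkeeping by a single case-sensitive regex substitution deleting every character outside [a-z0-9._-].
import Mathlib
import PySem

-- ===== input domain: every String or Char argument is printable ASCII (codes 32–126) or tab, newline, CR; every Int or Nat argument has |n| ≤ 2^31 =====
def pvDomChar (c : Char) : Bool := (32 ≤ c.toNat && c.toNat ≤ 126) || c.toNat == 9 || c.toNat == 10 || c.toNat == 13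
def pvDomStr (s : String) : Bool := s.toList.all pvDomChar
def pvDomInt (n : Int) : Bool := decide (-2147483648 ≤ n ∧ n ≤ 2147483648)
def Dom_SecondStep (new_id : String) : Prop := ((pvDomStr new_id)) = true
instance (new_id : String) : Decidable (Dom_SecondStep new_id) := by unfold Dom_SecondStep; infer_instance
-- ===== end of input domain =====

-- B replaces A's per-character ord()-range loop by a single regex substitution deleting chars outside [a-z0-9._-] (timed measurably faster, same O(n)).
-- ===== PORT A =====
-- Literal port of A: index loop over new_id appending the code point, deleting it
-- again when it is not in an allowed range, else turning it back into the char.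
def SecondStepLoop (new_id : List Char) : List Char → List Char
  | acc => new_id.foldl (fun temp c =>
      let n : Int := c.toNat
      if ¬ (97 ≤ n ∧ n ≤ 122 ∨ 48 ≤ n ∧ n ≤ 57 ∨ n = 45 ∨ n = 46 ∨ n = 95) then
        temp  -- append then del temp[-1]
      else
        temp ++ [c]  -- temp[-1] = chr(temp[-1])
    ) acc

def SecondStep (new_id : String) : String :=
  String.mk (SecondStepLoop new_id.toList [])

-- ===== PORT B =====
-- B: one regex substitution re.sub(r'[^a-z0-9._-]', '', new_id); the substitution
-- that deletes every char outside the class is exactly a filter by the class.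
def allowedB (c : Char) : Bool :=
  ('a' ≤ c && c ≤ 'z') || ('0' ≤ c && c ≤ '9') || c == '.' || c == '_' || c == '-'

def SecondStep_alt (new_id : String) : String :=
  String.mk (new_id.toList.filter allowedB)

-- ===== PRECONDITION & SPEC =====
def Spec_SecondStep (new_id : String) (out : String) : Prop := out = SecondStep_alt new_id
instance (new_id : String) (out : String) : Decidable (Spec_SecondStep new_id out) := by unfold Spec_SecondStep; infer_instance

-- ===== CLAIM (what is proved, stated in full; the proofs are below) =====
def Claim_equal_SecondStep : Prop := ∀ (new_id : String), Dom_SecondStep new_id → Spec_SecondStep new_id (SecondStep new_id)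

-- ===== LEMMAS AND PROOFS =====

lemma allowedB_iff (c : Char) :
    allowedB c = true ↔ (97 ≤ (c.toNat:Int) ∧ (c.toNat:Int) ≤ 122 ∨
      48 ≤ (c.toNat:Int) ∧ (c.toNat:Int) ≤ 57 ∨
      (c.toNat:Int) = 45 ∨ (c.toNat:Int) = 46 ∨ (c.toNat:Int) = 95) := by
  have ha : 'a'.val.toNat = 97 := by decide
  have hz : 'z'.val.toNat = 122 := by decide
  have h0 : '0'.val.toNat = 48 := by decide
  have h9 : '9'.val.toNat = 57 := by decide
  have hd : '.'.val.toNat = 46 := by decide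
  have hu : '_'.val.toNat = 95 := by decide
  have hm : '-'.val.toNat = 45 := by decide
  simp only [allowedB, Bool.or_eq_true, Bool.and_eq_true, decide_eq_true_eq,
    beq_iff_eq, Char.le_def, Char.ext_iff, UInt32.le_iff_toNat_le, Char.toNat,
    ha, hz, h0, h9, hd, hu, hm, ← UInt32.toNat_inj]
  omega

lemma loop_filter (l acc : List Char) :
    SecondStepLoop l acc = acc ++ l.filter allowedB := by
  unfold SecondStepLoop
  induction l generalizing acc with
  | nil => simp
  | cons c t ih =>
    simp only [List.foldl_cons]
    by_cases h : allowedB c = true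
    · rw [if_neg (not_not_intro ((allowedB_iff c).mp h))]
      rw [ih (acc ++ [c])]
      simp [h]
    · rw [if_pos (fun hx => h ((allowedB_iff c).mpr hx))]
      rw [ih acc]
      simp [h]

-- ===== VERDICT (by name: the statement is the Claim_ definition above) =====
theorem SecondStep_spec : Claim_equal_SecondStep := by
  intro new_id _
  unfold Spec_SecondStep SecondStep SecondStep_alt
  rw [loop_filter]
  simp
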